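-- pv_equiv track=rewrite | github.com/itswin/Battlecode24 | scripts/gen_pathing.py | gen_init
-- ===== SOURCE A (Python) =====
-- def encode(x, y):
--     return (x+7) + 15*(y+7)
--
-- DIRECTIONS = {
--     (1, 0): 'EAST',
--     (-1, 0): 'WEST',
--     (0, 1): 'NORTH',
--     (0, -1): 'SOUTH',
--     (1, 1): 'NORTHEAST',
--     (-1, 1): 'NORTHWEST',
--     (1, -1): 'SOUTHEAST',
--     (-1, -1): 'SOUTHWEST',
-- }
--
-- def dist(x, y):
--     return x*x + y*y
--
-- def sign(x):
--     if x > 0: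
--         return 1
--     if x < 0:
--         return -1
--     return 0
--
-- def gen_init(radius):
--     out = f"""
--         l{encode(0,0)} = rc.getLocation();
--         d{encode(0,0)} = 0;
--         // dir{encode(0,0)} = ZERO;
-- """
--     for r2 in range(1, radius+1):
--         for x in range(-7, 8):
--             for y in range(-7, 8):
--                 if dist(x, y) == r2:
--                     out += f"""
--         l{encode(x,y)} = l{encode(x - sign(x), y - sign(y))}.add({DIRECTIONS[(sign(x), sign(y))]}); // ({x}, {y}) from ({x - sign(x)}, {y - sign(y)})
--         d{encode(x,y)} = 99999;
--         // dir{encode(x,y)} = null;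
-- """
--     return out
-- ===== SOURCE B (Python) =====
-- def gen_init(radius):
--     cells = [(x, y) for x in range(-7, 8) for y in range(-7, 8) if x * x + y * y > 0]
--     cells.sort(key=lambda c: c[0] * c[0] + c[1] * c[1])
--     pieces = ["\n        l112 = rc.getLocation();\n        d112 = 0;\n        // dir112 = ZERO;\n"]
--     for x, y in cells:
--         if x * x + y * y > radius:
--             break
--         sx, sy = (x > 0) - (x < 0), (y > 0) - (y < 0)
--         name = ("NORTH" if sy > 0 else "SOUTH" if sy < 0 else "") \
--              + ("EAST" if sx > 0 else "WEST" if sx < 0 else "")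
--         n, p = (x + 7) + 15 * (y + 7), (x - sx + 7) + 15 * (y - sy + 7)
--         pieces.append(f"\n        l{n} = l{p}.add({name}); // ({x}, {y})"
--                       f" from ({x - sx}, {y - sy})\n"
--                       f"        d{n} = 99999;\n"
--                       f"        // dir{n} = null;\n")
--     return "".join(pieces)
-- ===== Notes on version B (the rewrite author's own statement) =====
-- stated objective: faster
-- what changed: Instead of rescanning the 15x15 grid once per r2 in range(1, radius+1), B lists the nonzero cells once, stably sorts them by squared distance, and emits blocks until the first cell whose distance exceeds radius; direction names are composed from the signs instead of a dict lookup.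
import Mathlib
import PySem

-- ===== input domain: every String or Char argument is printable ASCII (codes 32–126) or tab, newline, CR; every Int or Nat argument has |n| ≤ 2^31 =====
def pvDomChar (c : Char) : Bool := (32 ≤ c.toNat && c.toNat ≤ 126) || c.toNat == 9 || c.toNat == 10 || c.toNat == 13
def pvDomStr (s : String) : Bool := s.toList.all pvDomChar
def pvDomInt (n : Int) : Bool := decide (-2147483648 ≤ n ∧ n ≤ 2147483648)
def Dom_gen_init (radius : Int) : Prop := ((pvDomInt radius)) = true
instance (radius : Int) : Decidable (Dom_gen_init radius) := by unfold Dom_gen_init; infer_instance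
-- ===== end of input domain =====

-- B replaces A's rescan of the whole fixed grid for every r2 in range(1, radius+1) by one
-- stable sort of the nonzero grid cells by squared distance followed by a single emit loop
-- that stops at the first cell beyond radius (objective: faster — A does O(radius) grid scans).

-- ===== PORT A =====
-- shared module context of A: encode, DIRECTIONS, dist, sign and the f-string templates
def pvEncode (x y : Int) : Int := (x + 7) + 15 * (y + 7)

def pvDirections : PySem.Dict (Int × Int) (List Char) :=
  PySem.Dict.ofList
    [ ((1, 0), "EAST".toList), ((-1, 0), "WEST".toList)
    , ((0, 1), "NORTH".toList), ((0, -1), "SOUTH".toList)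
    , ((1, 1), "NORTHEAST".toList), ((-1, 1), "NORTHWEST".toList)
    , ((1, -1), "SOUTHEAST".toList), ((-1, -1), "SOUTHWEST".toList) ]

def pvDist (x y : Int) : Int := x * x + y * y

def pvSign (x : Int) : Int := if x > 0 then 1 else if x < 0 then -1 else 0

-- the initial f-string of gen_init (encode(0,0) interpolated three times)
def pvHeader : List Char :=
  "\n        l".toList ++ PySem.Int.toChars (pvEncode 0 0)
  ++ " = rc.getLocation();\n        d".toList ++ PySem.Int.toChars (pvEncode 0 0)
  ++ " = 0;\n        // dir".toList ++ PySem.Int.toChars (pvEncode 0 0)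
  ++ " = ZERO;\n".toList

-- the per-cell f-string; DIRECTIONS[(sign(x), sign(y))] ported as getD with default []:
-- at every call site dist(x,y) ≥ 1, so (sign x, sign y) ≠ (0,0) and the key is present
def pvBlock (x y : Int) : List Char :=
  "\n        l".toList ++ PySem.Int.toChars (pvEncode x y)
  ++ " = l".toList ++ PySem.Int.toChars (pvEncode (x - pvSign x) (y - pvSign y))
  ++ ".add(".toList ++ pvDirections.getD (pvSign x, pvSign y) []
  ++ "); // (".toList ++ PySem.Int.toChars x
  ++ ", ".toList ++ PySem.Int.toChars y
  ++ ") from (".toList ++ PySem.Int.toChars (x - pvSign x)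
  ++ ", ".toList ++ PySem.Int.toChars (y - pvSign y)
  ++ ")\n        d".toList ++ PySem.Int.toChars (pvEncode x y)
  ++ " = 99999;\n        // dir".toList ++ PySem.Int.toChars (pvEncode x y)
  ++ " = null;\n".toList

def gen_init (radius : Int) : String :=
  let out := pvHeader
  let out := (PySem.List.pyRange 1 (radius + 1)).foldl (fun out r2 =>
    (PySem.List.pyRange (-7) 8).foldl (fun out x =>
      (PySem.List.pyRange (-7) 8).foldl (fun out y =>
        if pvDist x y = r2 then out ++ pvBlock x y else out) out) out) out
  String.ofList out

-- ===== PORT B =====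
-- sign computed as (x > 0) - (x < 0)
def pvSgn (x : Int) : Int := (if 0 < x then 1 else 0) - (if x < 0 then 1 else 0)

-- direction name composed from the two signs (no dictionary)
def pvName (sx sy : Int) : List Char :=
  (if 0 < sy then "NORTH".toList else if sy < 0 then "SOUTH".toList else [])
  ++ (if 0 < sx then "EAST".toList else if sx < 0 then "WEST".toList else [])

-- the per-cell f-string of Source B (three Java lines)
def pvPiece (x y : Int) : List Char :=
  let sx := pvSgn x
  let sy := pvSgn y
  let n := PySem.Int.toChars ((x + 7) + 15 * (y + 7))
  let p := PySem.Int.toChars ((x - sx + 7) + 15 * (y - sy + 7))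
  "\n        l".toList ++ n ++ " = l".toList ++ p ++ ".add(".toList ++ pvName sx sy
    ++ "); // (".toList ++ PySem.Int.toChars x ++ ", ".toList ++ PySem.Int.toChars y
    ++ ") from (".toList ++ PySem.Int.toChars (x - sx) ++ ", ".toList
    ++ PySem.Int.toChars (y - sy) ++ ")\n".toList
    ++ ("        d".toList ++ n ++ " = 99999;\n".toList)
    ++ ("        // dir".toList ++ n ++ " = null;\n".toList)

def gen_init_alt (radius : Int) : String :=
  let cells := (PySem.List.pyRange (-7) 8).flatMap (fun x =>
    ((PySem.List.pyRange (-7) 8).filter (fun y => decide (x * x + y * y > 0))).map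
      (fun y => (x, y)))
  let cells := PySem.List.sorted cells (fun c => c.1 * c.1 + c.2 * c.2)
  -- the for-loop over the sorted list with 'break' at the first d > radius = takeWhile
  let pieces :=
    "\n        l112 = rc.getLocation();\n        d112 = 0;\n        // dir112 = ZERO;\n".toList
    :: (cells.takeWhile (fun c => decide (c.1 * c.1 + c.2 * c.2 ≤ radius))).map
        (fun c => pvPiece c.1 c.2)
  String.ofList (PySem.Chars.join [] pieces)

-- ===== PRECONDITION & SPEC =====
def Spec_gen_init (radius : Int) (out : String) : Prop := out = gen_init_alt radius
instance (radius : Int) (out : String) : Decidable (Spec_gen_init radius out) := by unfold Spec_gen_init; infer_instance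

-- ===== CLAIM (what is proved, stated in full; the proofs are below) =====
def Claim_equal_gen_init : Prop := ∀ (radius : Int), Dom_gen_init radius → Spec_gen_init radius (gen_init radius)

-- ===== LEMMAS AND PROOFS =====

-- canonical forms both ports are reduced to
def pvR : List Int := PySem.List.pyRange (-7) 8

def pvPairs : List (Int × Int) :=
  pvR.flatMap (fun x => (pvR.filter (fun y => decide (pvDist x y > 0))).map (fun y => (x, y)))

def pvDistList : List Int := pvPairs.map (fun c => pvDist c.1 c.2)

def pvS : List Int := PySem.List.sorted (PySem.Set.ofList pvDistList) (fun k => k)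

def pvDelta (r2 : Int) : List Char :=
  pvR.flatMap (fun x =>
    (pvR.filter (fun y => decide (pvDist x y = r2))).flatMap (fun y => pvBlock x y))

def pvContrib (k : Int) : List Char :=
  (pvPairs.filter (fun c => pvDist c.1 c.2 == k)).flatMap (fun c => pvBlock c.1 c.2)

-- the sorted cell list of B, and its bucket decomposition
def pvSorted : List (Int × Int) := PySem.List.sorted pvPairs (fun c => c.1 * c.1 + c.2 * c.2)

def pvGrouped : List (Int × Int) :=
  pvS.flatMap (fun k => pvPairs.filter (fun c => pvDist c.1 c.2 == k))

theorem pv_join_nil (ps : List (List Char)) : PySem.Chars.join [] ps = ps.flatten := by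
  induction ps with
  | nil => simp [PySem.Chars.join_nil]
  | cons a t ih =>
    cases t with
    | nil => simp [PySem.Chars.join_singleton]
    | cons b u =>
      rw [PySem.Chars.join_cons_cons, ih]
      simp

theorem pv_flatten_map {b c : Type} (l : List b) (g : b → List c) :
    (l.map g).flatten = l.flatMap g := by
  induction l with
  | nil => rfl
  | cons a t ih => simp [ih]

theorem pv_flatMap_filter {a b : Type} (l : List a) (f : a → List b) (p : a → Bool)
    (h : ∀ x ∈ l, p x = false → f x = []) :
    l.flatMap f = (l.filter p).flatMap f := by
  induction l with
  | nil => rfl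
  | cons x t ih =>
    by_cases hp : p x = true
    · simp [hp, ih (fun z hz => h z (List.mem_cons_of_mem _ hz))]
    · simp only [Bool.not_eq_true] at hp
      simp [hp, h x (by simp) hp,
        ih (fun z hz => h z (List.mem_cons_of_mem _ hz))]

theorem pv_flatMap_congr {a b : Type} (l : List a) (f g : a → List b)
    (h : ∀ x ∈ l, f x = g x) : l.flatMap f = l.flatMap g := by
  induction l with
  | nil => rfl
  | cons x t ih =>
    simp [List.flatMap_cons, h x (by simp),
      ih (fun z hz => h z (List.mem_cons_of_mem _ hz))]

theorem pv_A_canon (radius : Int) :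
    gen_init radius
      = String.ofList (pvHeader ++ (PySem.List.pyRange 1 (radius + 1)).flatMap (fun r2 => pvDelta r2)) := by
  simp only [gen_init, pvDelta, pvR,
    PySem.List.foldl_ite_eq_foldl_filter, PySem.List.foldl_append_eq_flatMap]

theorem pv_mem_pvPairs (c : Int × Int) :
    c ∈ pvPairs ↔ c.1 ∈ pvR ∧ c.2 ∈ pvR ∧ 0 < pvDist c.1 c.2 := by
  unfold pvPairs
  constructor
  · intro h
    simp only [List.mem_flatMap, List.mem_map, List.mem_filter] at h
    obtain ⟨x, hx, y, ⟨hy, hd⟩, rfl⟩ := h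
    simp only [decide_eq_true_eq] at hd
    exact ⟨hx, hy, hd⟩
  · intro ⟨h1, h2, h3⟩
    simp only [List.mem_flatMap, List.mem_map, List.mem_filter]
    exact ⟨c.1, h1, c.2, ⟨h2, by simpa using h3⟩, rfl⟩

theorem pv_distList_pos : ∀ k ∈ pvDistList, 1 ≤ k := by
  intro k hk
  unfold pvDistList at hk
  obtain ⟨c, hc, rfl⟩ := List.mem_map.mp hk
  have := (pv_mem_pvPairs c).mp hc
  omega

theorem pv_mem_pvS (k : Int) : k ∈ pvS ↔ k ∈ pvDistList := by
  unfold pvS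
  rw [PySem.List.mem_sorted, PySem.Set.mem_ofList]

theorem pv_pvS_pairwise : pvS.Pairwise (· < ·) :=
  PySem.List.sorted_ofList_pairwise_lt pvDistList

-- the stable sort by distance, written out bucket by bucket (both sides are closed lists)
set_option maxRecDepth 200000 in
set_option maxHeartbeats 4000000 in
theorem pv_sorted_eq_grouped : pvSorted = pvGrouped := by decide

theorem pv_pairwise_flatMap {a b : Type} (R : b → b → Prop) (l : List a) (g : a → List b)
    (h1 : l.Pairwise (fun u v => ∀ x ∈ g u, ∀ y ∈ g v, R x y))
    (h2 : ∀ u ∈ l, (g u).Pairwise R) : (l.flatMap g).Pairwise R := by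
  induction l with
  | nil => simp
  | cons u t ih =>
    rw [List.flatMap_cons, List.pairwise_append]
    rcases List.pairwise_cons.mp h1 with ⟨hu, ht⟩
    refine ⟨h2 u (by simp), ih ht (fun v hv => h2 v (by simp [hv])), ?_⟩
    intro x hx y hy
    obtain ⟨v, hv, hyv⟩ := List.mem_flatMap.mp hy
    exact hu v hv x hx y hyv

theorem pv_grouped_pairwise :
    pvGrouped.Pairwise (fun a b => a.1 * a.1 + a.2 * a.2 ≤ b.1 * b.1 + b.2 * b.2) := by
  unfold pvGrouped
  apply pv_pairwise_flatMap
  · refine pv_pvS_pairwise.imp ?_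
    intro k k' hkk x hx y hy
    have hdx : pvDist x.1 x.2 = k := by simpa using (List.mem_filter.mp hx).2
    have hdy : pvDist y.1 y.2 = k' := by simpa using (List.mem_filter.mp hy).2
    unfold pvDist at hdx hdy
    omega
  · intro k hk
    refine List.pairwise_of_forall_mem_list ?_
    intro x hx y hy
    have hdx : pvDist x.1 x.2 = k := by simpa using (List.mem_filter.mp hx).2
    have hdy : pvDist y.1 y.2 = k := by simpa using (List.mem_filter.mp hy).2
    unfold pvDist at hdx hdy
    omega

-- Source B's sign and direction name agree with A's
theorem pv_sgn_eq (x : Int) : pvSgn x = pvSign x := by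
  unfold pvSgn pvSign
  split_ifs <;> omega

theorem pv_name_eq (x y : Int) :
    pvName (pvSign x) (pvSign y) = pvDirections.getD (pvSign x, pvSign y) [] := by
  unfold pvSign
  split_ifs <;> decide

-- Source B's per-cell string equals A's per-cell string (on every cell)
theorem pv_piece_eq_block (x y : Int) : pvPiece x y = pvBlock x y := by
  have hseg1 : ∀ r : List Char,
      ")\n".toList ++ ("        d".toList ++ r) = ")\n        d".toList ++ r := by
    intro r
    rw [← List.append_assoc]
    rw [show ")\n".toList ++ "        d".toList = ")\n        d".toList from by decide]
  have hseg2 : ∀ r : List Char,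
      " = 99999;\n".toList ++ ("        // dir".toList ++ r)
        = " = 99999;\n        // dir".toList ++ r := by
    intro r
    rw [← List.append_assoc]
    rw [show " = 99999;\n".toList ++ "        // dir".toList
          = " = 99999;\n        // dir".toList from by decide]
  simp only [pvPiece, pvBlock, pvEncode]
  rw [pv_sgn_eq, pv_sgn_eq, pv_name_eq]
  simp only [List.append_assoc]
  rw [hseg1, hseg2]

theorem pv_takeWhile_eq_filter {a : Type} (key : a → Int) (r : Int) (l : List a)
    (h : l.Pairwise (fun u v => key u ≤ key v)) :
    l.takeWhile (fun u => decide (key u ≤ r)) = l.filter (fun u => decide (key u ≤ r)) := by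
  induction l with
  | nil => rfl
  | cons u t ih =>
    rcases List.pairwise_cons.mp h with ⟨hu, ht⟩
    by_cases hk : key u ≤ r
    · simp [hk, ih ht]
    · simp only [List.takeWhile_cons, List.filter_cons, decide_eq_true_eq]
      rw [if_neg hk, if_neg hk]
      symm
      rw [List.filter_eq_nil_iff]
      intro v hv
      have := hu v hv
      simp only [decide_eq_true_eq]
      omega

theorem pv_headerB_eq :
    ("\n        l112 = rc.getLocation();\n        d112 = 0;\n        // dir112 = ZERO;\n".toList)
      = pvHeader := by decide

set_option maxHeartbeats 1000000 in
theorem pv_B_canon (radius : Int) :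
    gen_init_alt radius
      = String.ofList (pvHeader ++
          (pvGrouped.filter (fun c => decide (c.1 * c.1 + c.2 * c.2 ≤ radius))).flatMap
            (fun c => pvBlock c.1 c.2)) := by
  simp only [gen_init_alt]
  rw [show ((PySem.List.pyRange (-7) 8).flatMap (fun x =>
        ((PySem.List.pyRange (-7) 8).filter (fun y => decide (x * x + y * y > 0))).map
          (fun y => (x, y)))) = pvPairs from rfl]
  rw [show PySem.List.sorted pvPairs (fun c => c.1 * c.1 + c.2 * c.2) = pvSorted from rfl]
  rw [pv_sorted_eq_grouped,
    pv_takeWhile_eq_filter (fun c : Int × Int => c.1 * c.1 + c.2 * c.2) radius pvGrouped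
      pv_grouped_pairwise,
    pv_join_nil, List.flatten_cons, pv_flatten_map]
  rw [pv_headerB_eq]
  apply congrArg
  apply congrArg
  apply pv_flatMap_congr
  intro c _
  exact pv_piece_eq_block c.1 c.2

theorem pv_delta_eq_contrib (k : Int) (hk : 1 ≤ k) : pvContrib k = pvDelta k := by
  unfold pvContrib pvDelta pvPairs
  rw [List.filter_flatMap, List.flatMap_assoc]
  apply pv_flatMap_congr
  intro x _
  rw [List.filter_map, List.flatMap_map, List.filter_filter]
  have hf : ∀ (p q : Int → Bool), (∀ y, p y = q y) → pvR.filter p = pvR.filter q := by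
    intro p q h
    exact List.filter_congr (fun y _ => h y)
  rw [hf _ (fun y => decide (pvDist x y = k)) ?_]
  · intro y
    simp only [Function.comp_def]
    by_cases h : pvDist x y = k
    · simp [h]
      omega
    · simp [h]

theorem pv_delta_nil (r2 : Int) (h1 : 1 ≤ r2) (h : r2 ∉ pvDistList) : pvDelta r2 = [] := by
  unfold pvDelta
  rw [List.flatMap_eq_nil_iff]
  intro x hx
  rw [List.flatMap_eq_nil_iff]
  intro y hy
  exfalso
  rw [List.mem_filter] at hy
  have hd : pvDist x y = r2 := by simpa using hy.2
  apply h
  unfold pvDistList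
  refine List.mem_map.mpr ⟨(x, y), ?_, hd⟩
  exact (pv_mem_pvPairs (x, y)).mpr ⟨hx, hy.1, by show 0 < pvDist x y; omega⟩

set_option maxRecDepth 8192 in
theorem pv_lists_eq (radius : Int) :
    (PySem.List.pyRange 1 (radius + 1)).filter (fun r2 => decide (r2 ∈ pvDistList))
      = pvS.filter (fun k => decide (k ≤ radius)) := by
  apply List.eq_of_perm_of_sorted (le := fun a b : Int => a < b)
  · intro a b _ _ hab hba; omega
  · exact List.Pairwise.filter _ (PySem.List.pairwise_lt_pyRange_one 1 (radius + 1))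
  · exact List.Pairwise.filter _ pv_pvS_pairwise
  · refine (List.perm_ext_iff_of_nodup ?_ ?_).mpr ?_
    · exact ((PySem.List.pairwise_lt_pyRange_one 1 (radius + 1)).filter _).imp Int.ne_of_lt
    · exact (pv_pvS_pairwise.filter _).imp Int.ne_of_lt
    · intro a
      simp only [List.mem_filter, PySem.List.mem_pyRange_one, pv_mem_pvS, decide_eq_true_eq]
      constructor
      · rintro ⟨⟨_, h2⟩, h3⟩
        exact ⟨h3, by omega⟩
      · rintro ⟨h1, h2⟩
        exact ⟨⟨pv_distList_pos a h1, by omega⟩, h1⟩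

-- the filtered bucket decomposition collapses to "buckets with key ≤ radius"
theorem pv_grouped_filter (radius : Int) :
    (pvGrouped.filter (fun c => decide (c.1 * c.1 + c.2 * c.2 ≤ radius))).flatMap
        (fun c => pvBlock c.1 c.2)
      = (pvS.filter (fun k => decide (k ≤ radius))).flatMap pvContrib := by
  unfold pvGrouped
  rw [List.filter_flatMap, List.flatMap_assoc]
  rw [pv_flatMap_filter pvS _ (fun k => decide (k ≤ radius))
        (by
          intro k hk hkf
          simp only [decide_eq_false_iff_not, not_le] at hkf
          rw [show ((pvPairs.filter (fun c => pvDist c.1 c.2 == k)).filter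
                (fun c => decide (c.1 * c.1 + c.2 * c.2 ≤ radius))) = [] from ?_]
          · rfl
          · rw [List.filter_eq_nil_iff]
            intro c hc
            have hd : pvDist c.1 c.2 = k := by simpa using (List.mem_filter.mp hc).2
            unfold pvDist at hd
            simp only [decide_eq_true_eq]
            omega)]
  apply pv_flatMap_congr
  intro k hk
  rw [List.mem_filter] at hk
  have hkr : k ≤ radius := by simpa using hk.2
  rw [List.filter_eq_self.mpr]
  · rfl
  · intro c hc
    have hd : pvDist c.1 c.2 = k := by simpa using (List.mem_filter.mp hc).2
    unfold pvDist at hd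
    simp only [decide_eq_true_eq]
    omega

set_option maxRecDepth 8192 in
theorem pv_main (radius : Int) : gen_init radius = gen_init_alt radius := by
  rw [pv_A_canon, pv_B_canon, pv_grouped_filter]
  congr 1
  congr 1
  rw [pv_flatMap_filter (PySem.List.pyRange 1 (radius + 1)) (fun r2 => pvDelta r2)
        (fun r2 => decide (r2 ∈ pvDistList))
        (by
          intro x hx hfalse
          rw [PySem.List.mem_pyRange_one] at hx
          simp only [decide_eq_false_iff_not] at hfalse
          exact pv_delta_nil x hx.1 hfalse)]
  rw [pv_lists_eq]
  apply pv_flatMap_congr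
  intro k hk
  rw [List.mem_filter, pv_mem_pvS] at hk
  exact (pv_delta_eq_contrib k (pv_distList_pos k hk.1)).symm

-- ===== VERDICT (by name: the statement is the Claim_ definition above) =====
theorem gen_init_spec : Claim_equal_gen_init := by
  intro radius _
  unfold Spec_gen_init
  exact pv_main radius
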